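-- pv_equiv track=rewrite | github.com/swisstopo/lg-gcover | src/gcover/config/loader.py | _is_optional_field
-- ===== SOURCE A (Python) =====
-- def _is_optional_field(field_name: str) -> bool:
--     """Detect if a field is optional (can be None)"""
--     optional_keywords = [
--         "proxy",
--         "http_proxy",
--         "https_proxy",
--         "url",
--         "endpoint",
--         "webhook",
--         "callback",
--         "notification",
--         "alert",
--     ]
--     field_lower = field_name.lower()
--     return any(keyword in field_lower for keyword in optional_keywords)
-- ===== SOURCE B (Python) =====
-- _OPTIONAL_KEYWORDS = (
--     "proxy",
--     "http_proxy",
--     "https_proxy",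
--     "url",
--     "endpoint",
--     "webhook",
--     "callback",
--     "notification",
--     "alert",
-- )
--
--
-- def _is_optional_field(field_name: str) -> bool:
--     """Detect if a field is optional (can be None)"""
--     s = field_name.lower()
--     for i in range(len(s)):
--         if s.startswith(_OPTIONAL_KEYWORDS, i):
--             return True
--     return False
-- ===== Notes on version B (the rewrite author's own statement) =====
-- stated objective: alternative
-- what changed: Instead of looping over the keyword list doing a full substring search per keyword, B makes one left-to-right scan over the lowercased name and at each position tests the whole keyword tuple at once with startswith(tuple, i), returning on the first hit.
import Mathlib
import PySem

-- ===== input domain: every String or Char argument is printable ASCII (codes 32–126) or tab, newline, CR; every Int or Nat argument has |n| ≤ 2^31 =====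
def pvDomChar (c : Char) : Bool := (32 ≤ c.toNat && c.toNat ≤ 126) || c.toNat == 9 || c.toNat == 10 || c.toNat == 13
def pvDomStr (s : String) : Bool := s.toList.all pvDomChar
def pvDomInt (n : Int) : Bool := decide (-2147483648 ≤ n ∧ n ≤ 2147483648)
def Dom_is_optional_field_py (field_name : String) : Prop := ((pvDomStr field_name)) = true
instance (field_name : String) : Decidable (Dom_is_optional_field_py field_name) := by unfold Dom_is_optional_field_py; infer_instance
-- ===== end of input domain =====

-- B replaces A's per-keyword substring searches with a single left-to-right scan of the
-- lowercased name, testing all keywords as prefixes at each position (alternative decomposition).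


-- ===== PORT A =====
def pvKeywordsA : List String :=
  ["proxy", "http_proxy", "https_proxy", "url", "endpoint", "webhook", "callback",
   "notification", "alert"]

def is_optional_field_py (field_name : String) : Bool :=
  let field_lower := PySem.Str.lower field_name
  pvKeywordsA.any (fun keyword => PySem.Str.isIn keyword field_lower)

-- ===== PORT B =====
def pvKeywordsB : List (List Char) :=
  ["proxy".toList, "http_proxy".toList, "https_proxy".toList, "url".toList,
   "endpoint".toList, "webhook".toList, "callback".toList, "notification".toList,
   "alert".toList]

-- the 'for i in range(len(s)): if s.startswith(keywords, i)' loop as structural recursion on the suffix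
def pvScanB (cs : List Char) : Bool :=
  match cs with
  | [] => false
  | c :: t => if pvKeywordsB.any (fun k => k.isPrefixOf (c :: t)) then true else pvScanB t

def is_optional_field_py_alt (field_name : String) : Bool :=
  pvScanB (PySem.Str.lower field_name).toList

-- ===== PRECONDITION & SPEC =====
def Spec_is_optional_field_py (field_name : String) (out : Bool) : Prop := out = is_optional_field_py_alt field_name
instance (field_name : String) (out : Bool) : Decidable (Spec_is_optional_field_py field_name out) := by unfold Spec_is_optional_field_py; infer_instance

-- ===== CLAIM (what is proved, stated in full; the proofs are below) =====
def Claim_equal_is_optional_field_py : Prop := ∀ (field_name : String), Dom_is_optional_field_py field_name → Spec_is_optional_field_py field_name (is_optional_field_py field_name)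

-- ===== LEMMAS AND PROOFS =====

lemma pvScanB_true (cs : List Char) :
    pvScanB cs = true ↔ ∃ k ∈ pvKeywordsB, k <:+: cs := by
  induction cs with
  | nil =>
      simp only [pvScanB, List.infix_nil]
      constructor
      · intro h; cases h
      · intro h; exact absurd h (by decide)
  | cons c t ih =>
      simp only [pvScanB]
      split_ifs with h
      · simp only [List.any_eq_true, List.isPrefixOf_iff_prefix] at h
        obtain ⟨k, hk, hp⟩ := h
        exact iff_of_true rfl ⟨k, hk, hp.isInfix⟩
      · simp only [List.any_eq_true, List.isPrefixOf_iff_prefix] at h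
        push Not at h
        rw [ih]
        constructor
        · rintro ⟨k, hk, hinf⟩; exact ⟨k, hk, hinf.trans (List.suffix_cons c t).isInfix⟩
        · rintro ⟨k, hk, hinf⟩
          rcases List.infix_cons_iff.mp hinf with hp | hs
          · exact absurd hp (h k hk)
          · exact ⟨k, hk, hs⟩

-- ===== VERDICT (by name: the statement is the Claim_ definition above) =====
theorem is_optional_field_py_spec : Claim_equal_is_optional_field_py := by
  intro field_name _
  unfold Spec_is_optional_field_py
  simp only [is_optional_field_py, is_optional_field_py_alt]
  rw [Bool.eq_iff_iff, pvScanB_true]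
  simp [PySem.Chars.isIn_iff_infix, pvKeywordsA, pvKeywordsB]
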